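-- pv_equiv track=rewrite | github.com/sominshim/Algorithm | 백준/Gold/2616. 소형기관차/소형기관차.py | solution
-- ===== SOURCE A (Python) =====
-- def solution(N, arr, M):
--     # 누적합 계산
--     prefix = [0] * (N + 1)
--     for i in range(1, N + 1):
--         prefix[i] = prefix[i - 1] + arr[i - 1]
--
--     # dp[k][i]: k대의 기관차로 i번째 객차까지 고려했을 때 최대 승객 수
--     dp = [[0] * (N + 1) for _ in range(4)]  # 0~3대
--
--     for k in range(1, 4):  # 기관차 1대~3대
--         for i in range(M * k, N + 1):
--             sum_m = prefix[i] - prefix[i - M]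
--             dp[k][i] = max(dp[k][i - 1], dp[k - 1][i - M] + sum_m)
--
--     return dp[3][N]
-- ===== SOURCE B (Python) =====
-- def solution(N, arr, M):
--     # Recursive row decomposition: row(k) is computed from row(k-1) on demand,
--     # with a rolling window sum instead of a prefix-sum array and no 2-D table.
--     def row(k):
--         if k == 0:
--             return [0] * (N + 1)
--         prev = row(k - 1)
--         r = [0] * min(M * k, N + 1)
--         win = 0
--         for i in range(M * k, N + 1):
--             if i == M * k:
--                 win = sum(arr[i - M:i])
--             else:
--                 win += arr[i - 1] - arr[i - M - 1]
--             r.append(max(r[-1], prev[i - M] + win))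
--         return r
--     return row(3)[N]
-- ===== Notes on version B (the rewrite author's own statement) =====
-- stated objective: alternative
-- what changed: A fills a preallocated prefix-sum array and a 4x(N+1) bottom-up DP table with nested index loops; B computes each DP row by recursion on the train count k (row k built from row k-1), growing the row by appends and maintaining a rolling window sum instead of a prefix-sum array or any 2-D table.
-- outside the precondition, e.g. on solution(2, [1, 2], 0): A returns 0, B raises IndexError
import Mathlib
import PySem

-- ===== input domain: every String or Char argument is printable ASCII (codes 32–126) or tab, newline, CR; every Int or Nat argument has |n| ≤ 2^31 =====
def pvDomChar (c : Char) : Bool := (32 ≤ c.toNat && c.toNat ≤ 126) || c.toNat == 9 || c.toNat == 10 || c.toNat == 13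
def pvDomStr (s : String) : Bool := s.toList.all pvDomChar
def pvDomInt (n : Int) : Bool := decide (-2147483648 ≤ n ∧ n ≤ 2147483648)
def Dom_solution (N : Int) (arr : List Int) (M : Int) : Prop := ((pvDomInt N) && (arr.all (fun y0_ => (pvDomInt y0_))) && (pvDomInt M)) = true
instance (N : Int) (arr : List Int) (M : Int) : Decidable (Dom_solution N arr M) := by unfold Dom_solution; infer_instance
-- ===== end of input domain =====

-- B replaces A's prefix-sum array and 4×(N+1) bottom-up table by a recursive
-- row decomposition (row k computed from row k-1) with a rolling window sum;
-- objective: alternative (different structure, comparable cost).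

-- ===== PORT A =====
def prefixStep (arr : List Int) (p : List Int) (i : Int) : List Int :=
  PySem.List.pySetD p i (PySem.List.pyGetD p (i - 1) 0 + PySem.List.pyGetD arr (i - 1) 0)

def dpStep (pfx : List Int) (M : Int) (k : Int) (dp : List (List Int)) (i : Int) : List (List Int) :=
  let sum_m := PySem.List.pyGetD pfx i 0 - PySem.List.pyGetD pfx (i - M) 0
  PySem.List.pySetD dp k
    (PySem.List.pySetD (PySem.List.pyGetD dp k []) i
      (max (PySem.List.pyGetD (PySem.List.pyGetD dp k []) (i - 1) 0)
           (PySem.List.pyGetD (PySem.List.pyGetD dp (k - 1) []) (i - M) 0 + sum_m)))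

def solution (N : Int) (arr : List Int) (M : Int) : Int :=
  let pfx := (PySem.List.pyRange 1 (N + 1) 1).foldl (prefixStep arr) (List.replicate (N + 1).toNat 0)
  let dp := (PySem.List.pyRange 1 4 1).foldl
    (fun dp k => (PySem.List.pyRange (M * k) (N + 1) 1).foldl (dpStep pfx M k) dp)
    (List.replicate 4 (List.replicate (N + 1).toNat 0))
  PySem.List.pyGetD (PySem.List.pyGetD dp 3 []) N 0

-- ===== PORT B =====
def altStep (arr prev : List Int) (M b : Int) (st : List Int × Int) (i : Int) : List Int × Int :=
  let win := if i = b then (PySem.List.slice arr (some (i - M)) (some i)).sum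
             else st.2 + PySem.List.pyGetD arr (i - 1) 0 - PySem.List.pyGetD arr (i - M - 1) 0
  (st.1 ++ [max (PySem.List.pyGetD st.1 (-1) 0) (PySem.List.pyGetD prev (i - M) 0 + win)], win)

def altRow (N : Int) (arr : List Int) (M : Int) : Nat → List Int
  | 0 => List.replicate (N + 1).toNat 0
  | k + 1 =>
    let prev := altRow N arr M k
    let b := M * ((k : Int) + 1)
    ((PySem.List.pyRange b (N + 1) 1).foldl (altStep arr prev M b)
      (List.replicate (min b (N + 1)).toNat 0, 0)).1

def solution_alt (N : Int) (arr : List Int) (M : Int) : Int :=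
  PySem.List.pyGetD (altRow N arr M 3) N 0

-- ===== PRECONDITION & SPEC =====
-- A raises IndexError when N < 0 or N > len(arr).  Pre_ additionally restricts to the
-- problem's natural domain M ≥ 1 (a locomotive pulls a positive number of cars): for
-- M = 0 A still returns a value, reached only through negative-index wraparound of
-- dp[k][-1], which is accidental; B's algorithm raises (IndexError) there.
def Pre_solution (N : Int) (arr : List Int) (M : Int) : Prop :=
  0 ≤ N ∧ N ≤ arr.length ∧ 1 ≤ M
instance (N : Int) (arr : List Int) (M : Int) : Decidable (Pre_solution N arr M) := by
  unfold Pre_solution; infer_instance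

def pvWitness_solution : Int × List Int × Int := (2, [1, 2], 1)

def Spec_solution (N : Int) (arr : List Int) (M : Int) (out : Int) : Prop := out = solution_alt N arr M
instance (N : Int) (arr : List Int) (M : Int) (out : Int) : Decidable (Spec_solution N arr M out) := by unfold Spec_solution; infer_instance

-- ===== CLAIM (what is proved, stated in full; the proofs are below) =====
def Claim_equal_solution : Prop := ∀ (N : Int) (arr : List Int) (M : Int), Dom_solution N arr M → Pre_solution N arr M → Spec_solution N arr M (solution N arr M)

-- ===== LEMMAS AND PROOFS =====

-- Shared mathematical description: pvPre arr i is A's prefix[i]; pvW arr m i is the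
-- sum of the window of m cars ending at car i; pvF arr m k i is dp[k][i].
def pvPre (arr : List Int) (i : Nat) : Int := (arr.take i).sum
def pvW (arr : List Int) (m j : Nat) : Int := pvPre arr j - pvPre arr (j - m)

def pvFrow (prev : Nat → Int) (w : Nat → Int) (b m : Nat) : Nat → Int
  | 0 => 0
  | i + 1 => if i + 1 < b then 0 else max (pvFrow prev w b m i) (prev (i + 1 - m) + w (i + 1))

def pvF (arr : List Int) (m : Nat) : Nat → Nat → Int
  | 0, _ => 0
  | k + 1, i => pvFrow (pvF arr m k) (pvW arr m) (m * (k + 1)) m i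

-- proof-side view of A's inner loop acting on row k alone
def rowStep (pfx prev : List Int) (M : Int) (row : List Int) (i : Int) : List Int :=
  PySem.List.pySetD row i
    (max (PySem.List.pyGetD row (i - 1) 0)
         (PySem.List.pyGetD prev (i - M) 0 + (PySem.List.pyGetD pfx i 0 - PySem.List.pyGetD pfx (i - M) 0)))

lemma pvFrow_succ {prev w : Nat → Int} {b m i : Nat} (h : b ≤ i + 1) :
    pvFrow prev w b m (i + 1) = max (pvFrow prev w b m i) (prev (i + 1 - m) + w (i + 1)) := by
  simp [pvFrow, show ¬(i + 1 < b) from by omega]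

lemma pvFrow_of_lt {prev w : Nat → Int} {b m i : Nat} (h : i < b) : pvFrow prev w b m i = 0 := by
  cases i with
  | zero => rfl
  | succ j => simp [pvFrow, h]

lemma pvF_succ_fun (arr : List Int) (m k : Nat) :
    pvF arr m (k + 1) = pvFrow (pvF arr m k) (pvW arr m) (m * (k + 1)) m := by
  funext i
  simp [pvF]

lemma map_range_zero_ext {f : Nat → Int} {s : Nat} (h : ∀ j, j < s → f j = 0) :
    (List.range s).map f = List.replicate s 0 := by
  have h2 : ∀ x ∈ (List.range s).map f, x = (0:Int) := by
    intro x hx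
    obtain ⟨j, hj, rfl⟩ := List.mem_map.mp hx
    exact h j (List.mem_range.mp hj)
  simpa using List.eq_replicate_of_mem h2

lemma getD_map_range_append {f : Nat → Int} {j s : Nat} (rest : List Int) (h : j < s) :
    ((List.range s).map f ++ rest).getD j 0 = f j := by
  rw [List.getD_append _ _ _ _ (by simp [h]), PySem.List.getD_map_range _ _ _ _ h]

lemma pvPre_succ (arr : List Int) {j : Nat} (h : j < arr.length) :
    pvPre arr (j + 1) = pvPre arr j + arr.getD j 0 := by
  unfold pvPre
  rw [List.take_add_one, List.sum_append, List.getD_eq_getElem?_getD, List.getElem?_eq_getElem h]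
  simp

lemma pvW_succ (arr : List Int) {m j : Nat} (hm : m ≤ j) (hj : j < arr.length) :
    pvW arr m (j + 1) = pvW arr m j + arr.getD j 0 - arr.getD (j - m) 0 := by
  unfold pvW
  rw [pvPre_succ arr hj, show j + 1 - m = (j - m) + 1 from by omega,
      pvPre_succ arr (by omega)]
  ring

lemma pvPre_sub (arr : List Int) {a c : Nat} (hac : a ≤ c) :
    ((arr.drop a).take (c - a)).sum = pvPre arr c - pvPre arr a := by
  unfold pvPre
  rw [show c = a + (c - a) from by omega, List.take_add, List.sum_append]
  simp

-- A's prefix-sum loop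
lemma prefix_fold (arr : List Int) (n t : Nat) (ht : t ≤ n) (hn : n ≤ arr.length) :
    (PySem.List.pyRange 1 ((t : Int) + 1) 1).foldl (prefixStep arr) (List.replicate (n + 1) 0)
      = (List.range (t + 1)).map (pvPre arr) ++ List.replicate (n - t) 0 := by
  induction t with
  | zero =>
    rw [PySem.List.pyRange_one_eq_nil (by omega)]
    simp [pvPre, List.replicate_succ]
  | succ t ih =>
    have h1 : ((t + 1 : Nat) : Int) + 1 = ((t : Int) + 1) + 1 := by push_cast; ring
    rw [h1, PySem.List.pyRange_one_succ_right (by omega), List.foldl_append,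
        ih (by omega)]
    simp only [List.foldl_cons, List.foldl_nil]
    unfold prefixStep
    have h2 : ((t : Int) + 1) - 1 = ((t : Nat) : Int) := by ring
    have h3 : ((t : Int) + 1) = (((t+1 : Nat)) : Int) := by push_cast; ring
    rw [h2, h3, PySem.List.pySetD_natCast, PySem.List.pyGetD_natCast, PySem.List.pyGetD_natCast]
    have hlen : ((List.range (t + 1)).map (pvPre arr)).length = t + 1 := by simp
    have hget : ((List.range (t + 1)).map (pvPre arr) ++ List.replicate (n - t) 0).getD t 0
        = pvPre arr t := by
      rw [List.getD_append _ _ _ _ (by simp)]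
      simp [List.getD_eq_getElem?_getD]
    rw [hget]
    have hrep : List.replicate (n - t) (0:Int) = 0 :: List.replicate (n - (t+1)) 0 := by
      have : n - t = (n - (t+1)) + 1 := by omega
      rw [this, List.replicate_succ]
    rw [List.set_append, if_neg (by omega), hrep]
    simp only [hlen, Nat.sub_self, List.set_cons_zero]
    rw [List.range_succ (n := t + 1), List.map_append]
    simp [pvPre_succ arr (show t < arr.length by omega)]

-- A's inner loop, row shape (generic in the previous row g and window start b)
lemma row_fold (n m b : Nat) (g : Nat → Int) (w : Nat → Int) (pre : Nat → Int)
    (hw : ∀ j, w j = pre j - pre (j - m)) (hm : 1 ≤ m) (hb : m ≤ b)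
    (t : Nat) (htb : b + t ≤ n + 1) :
    (PySem.List.pyRange (b : Int) ((b : Int) + (t : Int)) 1).foldl
        (rowStep ((List.range (n + 1)).map pre) ((List.range (n + 1)).map g) (m : Int))
        (List.replicate (n + 1) 0)
      = (List.range (b + t)).map (pvFrow g w b m) ++ List.replicate (n + 1 - (b + t)) 0 := by
  induction t with
  | zero =>
    rw [PySem.List.pyRange_one_eq_nil (by omega), List.foldl_nil]
    have hz : (List.range (b + 0)).map (pvFrow g w b m) = List.replicate (b + 0) 0 :=
      map_range_zero_ext (fun j hj => pvFrow_of_lt (by omega))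
    rw [hz, ← List.replicate_add]
    congr 1
    omega
  | succ t ih =>
    have h1 : (b : Int) + ((t + 1 : Nat) : Int) = ((b : Int) + (t : Int)) + 1 := by push_cast; ring
    rw [h1, PySem.List.pyRange_one_succ_right (by omega), List.foldl_append,
        ih (by omega)]
    simp only [List.foldl_cons, List.foldl_nil]
    unfold rowStep
    have e0 : (b : Int) + (t : Int) = ((b + t : Nat) : Int) := by push_cast; ring
    have e1 : ((b + t : Nat) : Int) - 1 = ((b + t - 1 : Nat) : Int) := by omega
    have e2 : ((b + t : Nat) : Int) - (m : Int) = ((b + t - m : Nat) : Int) := by omega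
    rw [e0, e1, e2, PySem.List.pySetD_natCast, PySem.List.pyGetD_natCast, PySem.List.pyGetD_natCast,
        PySem.List.pyGetD_natCast, PySem.List.pyGetD_natCast]
    rw [getD_map_range_append _ (by omega), PySem.List.getD_map_range _ _ _ _ (by omega),
        PySem.List.getD_map_range _ _ _ _ (by omega), PySem.List.getD_map_range _ _ _ _ (by omega)]
    rw [List.set_append_right _ _ (by simp)]
    have hrep : List.replicate (n + 1 - (b + t)) (0:Int) = 0 :: List.replicate (n + 1 - (b + t + 1)) 0 := by
      have : n + 1 - (b + t) = (n + 1 - (b + t + 1)) + 1 := by omega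
      rw [this, List.replicate_succ]
    rw [hrep]
    simp only [List.length_map, List.length_range, Nat.sub_self, List.set_cons_zero]
    rw [show b + (t + 1) = (b + t) + 1 from by omega, List.range_succ (n := b + t), List.map_append]
    have hval : pvFrow g w b m (b + t)
        = max (pvFrow g w b m (b + t - 1)) (g (b + t - m) + (pre (b + t) - pre (b + t - m))) := by
      obtain ⟨i, hi⟩ : ∃ i, b + t = i + 1 := ⟨b + t - 1, by omega⟩
      rw [hi, pvFrow_succ (by omega), hw]
      simp
    rw [← hval]
    simp [List.append_assoc]

-- B's row loop
lemma alt_fold (arr : List Int) (n m b : Nat) (g : Nat → Int)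
    (hn : n ≤ arr.length) (hm : 1 ≤ m) (hb : m ≤ b) (hbn : b ≤ n)
    (t : Nat) (ht1 : 1 ≤ t) (htb : b + t ≤ n + 1) :
    (PySem.List.pyRange (b : Int) ((b : Int) + (t : Int)) 1).foldl
        (altStep arr ((List.range (n + 1)).map g) (m : Int) (b : Int))
        (List.replicate b 0, 0)
      = ((List.range (b + t)).map (pvFrow g (pvW arr m) b m), pvW arr m (b + t - 1)) := by
  induction t with
  | zero => omega
  | succ t ih =>
    by_cases ht0 : t = 0
    · subst ht0
      rw [show ((1:Nat):Int) = (1:Int) from rfl, PySem.List.pyRange_one_singleton,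
          List.foldl_cons, List.foldl_nil]
      simp only [altStep]
      simp only [if_true]
      have e2 : (b : Int) - (m : Int) = ((b - m : Nat) : Int) := by omega
      rw [e2, PySem.List.slice_natCast, PySem.List.pyGetD_natCast,
          PySem.List.getD_map_range _ _ _ _ (by omega)]
      have hwin : (List.take (b - (b - m)) (List.drop (b - m) arr)).sum = pvW arr m b := by
        rw [pvPre_sub arr (by omega)]
        rfl
      rw [hwin]
      have hrep : List.replicate b (0:Int) = List.replicate (b - 1) 0 ++ [0] := by
        rw [← List.replicate_succ']
        congr 1
        omega
      rw [hrep, PySem.List.pyGetD_neg_one_append_singleton]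
      have hval : pvFrow g (pvW arr m) b m b = max 0 (g (b - m) + pvW arr m b) := by
        obtain ⟨i, hi⟩ : ∃ i, b = i + 1 := ⟨b - 1, by omega⟩
        rw [hi, pvFrow_succ (by omega), pvFrow_of_lt (by omega)]
      rw [← hval, ← hrep]
      simp only [Prod.mk.injEq]
      refine ⟨?_, by congr 1⟩
      have hone : b + (0 + 1) = b + 1 := by omega
      rw [hone, List.range_succ, List.map_append,
          map_range_zero_ext (fun j hj => pvFrow_of_lt hj)]
      simp
    · have ht1' : 1 ≤ t := by omega
      have h1 : (b : Int) + ((t + 1 : Nat) : Int) = ((b : Int) + (t : Int)) + 1 := by push_cast; ring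
      rw [h1, PySem.List.pyRange_one_succ_right (by omega), List.foldl_append,
          ih ht1' (by omega)]
      simp only [List.foldl_cons, List.foldl_nil]
      simp only [altStep]
      have e0 : (b : Int) + (t : Int) = ((b + t : Nat) : Int) := by push_cast; ring
      rw [e0, if_neg (by omega)]
      have e1 : ((b + t : Nat) : Int) - 1 = ((b + t - 1 : Nat) : Int) := by omega
      have e2 : ((b + t : Nat) : Int) - (m : Int) = ((b + t - m : Nat) : Int) := by omega
      have e3 : ((b + t : Nat) : Int) - (m : Int) - 1 = ((b + t - 1 - m : Nat) : Int) := by omega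
      rw [e1, e3, e2, PySem.List.pyGetD_natCast, PySem.List.pyGetD_natCast, PySem.List.pyGetD_natCast,
          PySem.List.getD_map_range _ _ _ _ (by omega)]
      have hwin : pvW arr m (b + t - 1) + arr.getD (b + t - 1) 0 - arr.getD (b + t - 1 - m) 0
          = pvW arr m (b + t) := by
        obtain ⟨j, hj⟩ : ∃ j, b + t = j + 1 := ⟨b + t - 1, by omega⟩
        rw [hj]
        simp only [Nat.add_sub_cancel]
        rw [pvW_succ arr (by omega) (by omega)]
      rw [hwin]
      have hsplit : (List.range (b + t)).map (pvFrow g (pvW arr m) b m)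
          = (List.range (b + t - 1)).map (pvFrow g (pvW arr m) b m) ++ [pvFrow g (pvW arr m) b m (b + t - 1)] := by
        obtain ⟨j, hj⟩ : ∃ j, b + t = j + 1 := ⟨b + t - 1, by omega⟩
        rw [hj]
        simp only [Nat.add_sub_cancel]
        rw [List.range_succ, List.map_append]
        simp
      rw [hsplit, PySem.List.pyGetD_neg_one_append_singleton, ← hsplit]
      have hval : pvFrow g (pvW arr m) b m (b + t)
          = max (pvFrow g (pvW arr m) b m (b + t - 1)) (g (b + t - m) + pvW arr m (b + t)) := by
        obtain ⟨i, hi⟩ : ∃ i, b + t = i + 1 := ⟨b + t - 1, by omega⟩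
        rw [hi, pvFrow_succ (by omega)]
        simp
      rw [← hval]
      simp only [Prod.mk.injEq]
      refine ⟨?_, by congr 1⟩
      have h2 : b + (t + 1) = (b + t) + 1 := by omega
      rw [h2, List.range_succ, List.map_append]
      simp

-- A's inner loop produces exactly row c'+1 of pvF
lemma row_result (arr : List Int) (n m c' : Nat) (hm : 1 ≤ m) :
    (PySem.List.pyRange ((m : Int) * ((c' : Int) + 1)) ((n : Int) + 1) 1).foldl
        (rowStep ((List.range (n + 1)).map (pvPre arr)) ((List.range (n + 1)).map (pvF arr m c')) (m : Int))
        (List.replicate (n + 1) 0)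
      = (List.range (n + 1)).map (pvF arr m (c' + 1)) := by
  rw [pvF_succ_fun arr m c']
  by_cases hcn : m * (c' + 1) ≤ n
  · have hc1 : (m : Int) * ((c' : Int) + 1) = ((m * (c' + 1) : Nat) : Int) := by push_cast; ring
    have hc2 : ((n : Int) + 1) = ((m * (c' + 1) : Nat) : Int) + ((n + 1 - m * (c' + 1) : Nat) : Int) := by
      rw [← Nat.cast_add, show m * (c' + 1) + (n + 1 - m * (c' + 1)) = n + 1 from by omega]
      push_cast; ring
    rw [hc1, hc2, row_fold n m (m * (c' + 1)) (pvF arr m c') (pvW arr m) (pvPre arr)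
          (fun j => rfl) hm (Nat.le_mul_of_pos_right m (by omega)) _ (by omega)]
    rw [show m * (c' + 1) + (n + 1 - m * (c' + 1)) = n + 1 from by omega]
    simp
  · have hb2 : ((n : Int) + 1) ≤ (m : Int) * ((c' : Int) + 1) := by
      calc ((n : Int) + 1) = ((n + 1 : Nat) : Int) := by push_cast; ring
        _ ≤ ((m * (c' + 1) : Nat) : Int) := by exact_mod_cast (by omega : n + 1 ≤ m * (c' + 1))
        _ = (m : Int) * ((c' : Int) + 1) := by push_cast; ring
    rw [PySem.List.pyRange_one_eq_nil hb2, List.foldl_nil]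
    symm
    exact map_range_zero_ext (fun j hj => pvFrow_of_lt (by omega))

-- B's rows are exactly the rows of pvF
lemma altRow_eq (arr : List Int) (n m : Nat) (hm : 1 ≤ m) (hn : n ≤ arr.length) :
    ∀ k, altRow (n : Int) arr (m : Int) k = (List.range (n + 1)).map (pvF arr m k)
  | 0 => by
    rw [show altRow (n : Int) arr (m : Int) 0 = List.replicate ((n : Int) + 1).toNat 0 from rfl,
        show ((n : Int) + 1).toNat = n + 1 from by omega]
    exact (map_range_zero_ext (fun j hj => rfl)).symm
  | (k + 1) => by
    simp only [altRow]
    rw [altRow_eq arr n m hm hn k, pvF_succ_fun arr m k]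
    by_cases hcn : m * (k + 1) ≤ n
    · have hc1 : (m : Int) * ((k : Int) + 1) = ((m * (k + 1) : Nat) : Int) := by push_cast; ring
      have hmin : min ((m * (k + 1) : Nat) : Int) ((n : Int) + 1) = ((m * (k + 1) : Nat) : Int) := by omega
      have hc2 : ((n : Int) + 1) = ((m * (k + 1) : Nat) : Int) + ((n + 1 - m * (k + 1) : Nat) : Int) := by
        rw [← Nat.cast_add, show m * (k + 1) + (n + 1 - m * (k + 1)) = n + 1 from by omega]
        push_cast; ring
      rw [hc1, hmin, show (((m * (k + 1) : Nat) : Int)).toNat = m * (k + 1) from by omega, hc2,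
          alt_fold arr n m (m * (k + 1)) (pvF arr m k) hn hm
            (Nat.le_mul_of_pos_right m (by omega)) hcn _ (by omega) (by omega)]
      rw [show m * (k + 1) + (n + 1 - m * (k + 1)) = n + 1 from by omega]
    · have hb2 : ((n : Int) + 1) ≤ (m : Int) * ((k : Int) + 1) := by
        calc ((n : Int) + 1) = ((n + 1 : Nat) : Int) := by push_cast; ring
          _ ≤ ((m * (k + 1) : Nat) : Int) := by exact_mod_cast (by omega : n + 1 ≤ m * (k + 1))
          _ = (m : Int) * ((k : Int) + 1) := by push_cast; ring
      rw [PySem.List.pyRange_one_eq_nil hb2, List.foldl_nil]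
      rw [min_eq_right hb2, show ((n : Int) + 1).toNat = n + 1 from by omega]
      exact (map_range_zero_ext (fun j hj => pvFrow_of_lt (by omega))).symm

-- A's table step touches only row k (k = 1, 2, 3 on a 4-row table)
lemma dpStep_one (pfx : List Int) (M : Int) (a b c d : List Int) (i : Int) :
    dpStep pfx M 1 [a, b, c, d] i = [a, rowStep pfx a M b i, c, d] := rfl
lemma dpStep_two (pfx : List Int) (M : Int) (a b c d : List Int) (i : Int) :
    dpStep pfx M 2 [a, b, c, d] i = [a, b, rowStep pfx b M c i, d] := rfl
lemma dpStep_three (pfx : List Int) (M : Int) (a b c d : List Int) (i : Int) :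
    dpStep pfx M 3 [a, b, c, d] i = [a, b, c, rowStep pfx c M d i] := rfl

lemma foldl_dp_one (pfx : List Int) (M : Int) (l : List Int) :
    ∀ (b : List Int) (a c d : List Int),
      l.foldl (dpStep pfx M 1) [a, b, c, d] = [a, l.foldl (rowStep pfx a M) b, c, d] := by
  induction l with
  | nil => intro b a c d; rfl
  | cons x xs ih => intro b a c d; rw [List.foldl_cons, dpStep_one, List.foldl_cons, ih]

lemma foldl_dp_two (pfx : List Int) (M : Int) (l : List Int) :
    ∀ (c : List Int) (a b d : List Int),
      l.foldl (dpStep pfx M 2) [a, b, c, d] = [a, b, l.foldl (rowStep pfx b M) c, d] := by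
  induction l with
  | nil => intro c a b d; rfl
  | cons x xs ih => intro c a b d; rw [List.foldl_cons, dpStep_two, List.foldl_cons, ih]

lemma foldl_dp_three (pfx : List Int) (M : Int) (l : List Int) :
    ∀ (d : List Int) (a b c : List Int),
      l.foldl (dpStep pfx M 3) [a, b, c, d] = [a, b, c, l.foldl (rowStep pfx c M) d] := by
  induction l with
  | nil => intro d a b c; rfl
  | cons x xs ih => intro d a b c; rw [List.foldl_cons, dpStep_three, List.foldl_cons, ih]

-- ===== VERDICT (by name: the statement is the Claim_ definition above) =====
theorem solution_spec : Claim_equal_solution := by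
  intro N arr M _ hpre
  obtain ⟨hN0, hNlen, hM1⟩ := hpre
  unfold Spec_solution
  obtain ⟨n, rfl⟩ : ∃ n : Nat, N = (n : Int) := ⟨N.toNat, by omega⟩
  obtain ⟨m, rfl⟩ : ∃ m : Nat, M = (m : Int) := ⟨M.toNat, by omega⟩
  have hn : n ≤ arr.length := by exact_mod_cast hNlen
  have hm : 1 ≤ m := by exact_mod_cast hM1
  have htn : ((n : Int) + 1).toNat = n + 1 := by omega
  -- B's side
  have hB : solution_alt (n : Int) arr (m : Int) = pvF arr m 3 n := by
    unfold solution_alt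
    rw [altRow_eq arr n m hm hn 3, PySem.List.pyGetD_natCast,
        PySem.List.getD_map_range _ _ _ _ (by omega)]
  -- A's side
  have hz : (List.range (n + 1)).map (pvF arr m 0) = List.replicate (n + 1) 0 :=
    map_range_zero_ext (fun j hj => rfl)
  have hpfx : (PySem.List.pyRange 1 ((n : Int) + 1) 1).foldl (prefixStep arr)
        (List.replicate (n + 1) 0) = (List.range (n + 1)).map (pvPre arr) := by
    rw [prefix_fold arr n n le_rfl hn]
    simp
  have hA : solution (n : Int) arr (m : Int) = pvF arr m 3 n := by
    unfold solution
    rw [htn, show (PySem.List.pyRange 1 4 1) = [1, 2, 3] from by decide]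
    simp only [List.foldl_cons, List.foldl_nil]
    rw [hpfx, show (List.replicate 4 (List.replicate (n + 1) (0:Int)))
          = [List.replicate (n + 1) 0, List.replicate (n + 1) 0,
             List.replicate (n + 1) 0, List.replicate (n + 1) 0] from rfl]
    have h1 := row_result arr n m 0 hm
    rw [hz] at h1
    simp only [Nat.cast_zero, zero_add] at h1
    have h2 := row_result arr n m 1 hm
    norm_num at h2
    have h3 := row_result arr n m 2 hm
    norm_num at h3
    rw [foldl_dp_one, h1, foldl_dp_two, h2, foldl_dp_three, h3]
    rw [show ((3 : Int) = ((3 : Nat) : Int)) from rfl]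
    simp only [PySem.List.pyGetD_natCast]
    rw [show ([List.replicate (n+1) (0:Int), (List.range (n+1)).map (pvF arr m 1),
          (List.range (n+1)).map (pvF arr m 2), (List.range (n+1)).map (pvF arr m 3)].getD 3 [])
        = (List.range (n+1)).map (pvF arr m 3) from rfl]
    rw [PySem.List.getD_map_range _ _ _ _ (by omega)]
  rw [hA, hB]
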